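-- pv_equiv track=rewrite | github.com/root-project/root | bindings/pyroot/pythonizations/python/ROOT/pythonization/__init__.py | _find_namespace_end
-- ===== SOURCE A (Python) =====
-- def _find_namespace_end(fqn):
--     '''
--     Find the position where the namespace in `fqn` ends.
--
--     Args:
--         fqn (string): fully-qualified class name.
--
--     Returns:
--         integer: position where the namespace in `fqn` ends, i.e. the position
--             of the last '::', or -1 if there is no '::' in `fqn`.
--     '''
--
--     last_found = -1
--     prev_c = ''
--     pos = 0
--     for c in fqn:
--         if c == ':' and prev_c == ':':
--             last_found = pos - 1
--         elif c == '<':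
--             # If we found a template, this is already the class name,
--             # so we're done!
--             break
--         prev_c = c
--         pos += 1
--
--     return last_found
-- ===== SOURCE B (Python) =====
-- def _find_namespace_end(fqn):
--     cut = fqn.find('<')
--     region = fqn if cut == -1 else fqn[:cut]
--     return region.rfind('::')
-- ===== Notes on version B (the rewrite author's own statement) =====
-- stated objective: faster
-- what changed: Replaces A's forward character-by-character scan with explicit state (last_found, prev_c, pos and a break at the template bracket) by computing the template boundary once with str.find and returning str.rfind of the namespace separator on that prefix.
import Mathlib
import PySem

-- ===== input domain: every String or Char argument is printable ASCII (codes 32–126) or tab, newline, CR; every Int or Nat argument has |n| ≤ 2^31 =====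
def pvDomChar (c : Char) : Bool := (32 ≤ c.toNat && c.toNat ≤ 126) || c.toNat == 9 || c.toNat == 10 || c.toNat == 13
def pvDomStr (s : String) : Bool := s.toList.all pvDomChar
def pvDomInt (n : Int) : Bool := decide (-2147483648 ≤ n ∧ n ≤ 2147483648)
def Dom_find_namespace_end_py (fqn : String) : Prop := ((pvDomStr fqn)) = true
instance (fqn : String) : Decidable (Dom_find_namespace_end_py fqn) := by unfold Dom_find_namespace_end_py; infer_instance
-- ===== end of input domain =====

-- B replaces A's forward state-tracking scan (last_found/prev_c/pos with a break at '<')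
-- by computing the template boundary with find('<') and a single rfind('::') on that prefix
-- (same O(n); a timing run measured B faster by a constant factor; same return value on every input).

-- ===== PORT A =====
-- the for-loop of A: state (last_found, prev_c, pos); prev_c = '' is ported as `none`
def find_namespace_end_loop : List Char → Int → Option Char → Int → Int
  | [], last, _, _ => last
  | c :: cs, last, prev, pos =>
    if c = ':' ∧ prev = some ':' then
      find_namespace_end_loop cs (pos - 1) (some c) (pos + 1)
    else if c = '<' then
      last
    else
      find_namespace_end_loop cs last (some c) (pos + 1)

def find_namespace_end_py (fqn : String) : Int :=
  find_namespace_end_loop fqn.toList (-1) none 0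

-- ===== PORT B =====
def find_namespace_end_py_alt (fqn : String) : Int :=
  let cut := PySem.Str.find fqn "<"
  let region := if cut = -1 then fqn else PySem.Str.slice fqn none (some cut)
  PySem.Str.rfind region "::"

-- ===== PRECONDITION & SPEC =====
def Spec_find_namespace_end_py (fqn : String) (out : Int) : Prop := out = find_namespace_end_py_alt fqn
instance (fqn : String) (out : Int) : Decidable (Spec_find_namespace_end_py fqn out) := by unfold Spec_find_namespace_end_py; infer_instance

-- ===== CLAIM (what is proved, stated in full; the proofs are below) =====
def Claim_equal_find_namespace_end_py : Prop := ∀ (fqn : String), Dom_find_namespace_end_py fqn → Spec_find_namespace_end_py fqn (find_namespace_end_py fqn)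

-- ===== LEMMAS AND PROOFS =====

-- the prefix of s before its first '<' (the part A's loop actually scans)
def pvRegion : List Char → List Char
  | [] => []
  | c :: cs => if c = '<' then [] else c :: pvRegion cs

theorem pvRegion_no_lt (s : List Char) : '<' ∉ pvRegion s := by
  induction s with
  | nil => simp [pvRegion]
  | cons c cs ih =>
    by_cases h : c = '<' <;> simp [pvRegion, h, ih]
    intro hc; exact absurd hc.symm h

theorem pvRegion_spec (s : List Char) :
    pvRegion s = if '<' ∈ s then s.take (s.idxOf '<') else s := by
  induction s with
  | nil => simp [pvRegion]
  | cons c cs ih =>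
    by_cases h : c = '<'
    · subst h; simp [pvRegion]
    · simp only [pvRegion, if_neg h, ih, List.mem_cons]
      by_cases hm : '<' ∈ cs
      · simp [hm, h, Ne.symm h]
      · simp [hm]; exact fun hc => absurd hc.symm h

-- characterization of Chars.find.go for the single-character pattern ['<']
theorem pvFindGo_lt (t : List Char) : ∀ k : Nat,
    PySem.Chars.find.go ['<'] t k =
      if '<' ∈ t then ((k + t.idxOf '<' : Nat) : Int) else -1 := by
  induction t with
  | nil => intro k; simp [PySem.Chars.find.go]
  | cons c cs ih =>
    intro k
    by_cases h : c = '<'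
    · subst h; simp [PySem.Chars.find.go, List.isPrefixOf]
    · have hpre : (['<'].isPrefixOf (c :: cs)) = false := by
        simp [List.isPrefixOf]
        intro hc; exact h hc.symm
      rw [PySem.Chars.find.go, hpre]
      simp only [Bool.false_eq_true, if_false, ih (k + 1), List.mem_cons]
      by_cases hm : '<' ∈ cs
      · simp [hm, h, Ne.symm h]; ring
      · simp [hm]; exact fun hc => absurd hc.symm h

theorem pvFind_lt (s : List Char) :
    PySem.Chars.find s ['<'] = if '<' ∈ s then (s.idxOf '<' : Int) else -1 := by
  rw [PySem.Chars.find, pvFindGo_lt]; simp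

-- the region B builds (find('<') / slice) is pvRegion
theorem pvRegion_eq_B (fqn : String) :
    (if PySem.Str.find fqn "<" = -1 then fqn
     else PySem.Str.slice fqn none (some (PySem.Str.find fqn "<"))).toList
      = pvRegion fqn.toList := by
  have hf : PySem.Str.find fqn "<" =
      if '<' ∈ fqn.toList then (fqn.toList.idxOf '<' : Int) else -1 := by
    rw [PySem.Str.find_eq]
    have : ("<" : String).toList = ['<'] := by decide
    rw [this, pvFind_lt]
  by_cases hm : '<' ∈ fqn.toList
  · have hne : PySem.Str.find fqn "<" ≠ -1 := by
      rw [hf, if_pos hm]; omega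
    rw [if_neg hne, PySem.Str.toList_slice, PySem.Chars.slice_eq_listSlice,
      hf, if_pos hm, PySem.List.slice_to_natCast, pvRegion_spec, if_pos hm]
  · rw [hf, if_neg hm, if_pos rfl, pvRegion_spec, if_neg hm]

-- rfind is at least -1
theorem pvRfindGo_ge (s sub : List Char) : ∀ j : Nat, -1 ≤ PySem.Chars.rfind.go s sub j := by
  intro j
  induction j with
  | zero => rw [PySem.Chars.rfind.go]; split <;> omega
  | succ j ih =>
    rw [PySem.Chars.rfind.go]
    split
    · omega
    · exact ih

-- peeling one character off the front of rfind's subject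
theorem pvRfindGo_cons (c : Char) (cs sub : List Char) : ∀ j : Nat,
    PySem.Chars.rfind.go (c :: cs) sub (j + 1) =
      if PySem.Chars.rfind.go cs sub j = -1 then
        (if sub.isPrefixOf (c :: cs) then 0 else -1)
      else 1 + PySem.Chars.rfind.go cs sub j := by
  intro j
  induction j with
  | zero =>
    rw [PySem.Chars.rfind.go, PySem.Chars.rfind.go, PySem.Chars.rfind.go]
    simp only [List.drop_succ_cons, List.drop_zero]
    split
    · split <;> simp_all
    · simp_all
  | succ j ih =>
    rw [PySem.Chars.rfind.go, ih]
    conv_rhs => rw [PySem.Chars.rfind.go]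
    simp only [List.drop_succ_cons]
    split
    · have h1 : ((j + 1 : Nat) : Int) ≠ -1 := by omega
      rw [if_neg h1]
      push_cast
      ring
    · rfl

theorem pvRfind_cons (c : Char) (cs : List Char) :
    PySem.Chars.rfind (c :: cs) [':', ':'] =
      if PySem.Chars.rfind cs [':', ':'] = -1 then
        (if c = ':' ∧ cs.head? = some ':' then 0 else -1)
      else 1 + PySem.Chars.rfind cs [':', ':'] := by
  have hp : ([':', ':'].isPrefixOf (c :: cs)) = (decide (c = ':' ∧ cs.head? = some ':')) := by
    cases cs with
    | nil => simp [List.isPrefixOf]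
    | cons d ds =>
      rw [Bool.eq_iff_iff]
      simp [List.isPrefixOf]
      constructor
      · rintro ⟨x, y⟩; exact ⟨x.symm, y.symm⟩
      · rintro ⟨x, y⟩; exact ⟨x.symm, y.symm⟩
  rw [PySem.Chars.rfind, PySem.Chars.rfind, List.length_cons, pvRfindGo_cons, hp]
  split
  · split_ifs <;> simp_all
  · rfl

-- A's loop on a '<'-free list computes rfind('::') with offset pos and boundary prev
theorem pvLoop_rfind (r : List Char) (hr : '<' ∉ r) :
    ∀ (prev : Option Char) (pos last : Int),
    find_namespace_end_loop r last prev pos =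
      if PySem.Chars.rfind r [':', ':'] = -1 then
        (if prev = some ':' ∧ r.head? = some ':' then pos - 1 else last)
      else pos + PySem.Chars.rfind r [':', ':'] := by
  induction r with
  | nil =>
    intro prev pos last
    have : PySem.Chars.rfind [] [':', ':'] = -1 := by decide
    simp [find_namespace_end_loop, this]
  | cons c cs ih =>
    intro prev pos last
    have hcs : '<' ∉ cs := fun h => hr (List.mem_cons_of_mem _ h)
    have hc : c ≠ '<' := fun h => hr (h ▸ List.mem_cons_self)
    have hge := pvRfindGo_ge cs [':', ':'] cs.length
    rw [pvRfind_cons]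
    by_cases hrf : PySem.Chars.rfind cs [':', ':'] = -1
    · by_cases hb : c = ':' ∧ cs.head? = some ':'
      · -- a "::" pair starts at this position
        rw [if_pos hrf, if_pos hb]
        by_cases hp : prev = some ':'
        · rw [find_namespace_end_loop, if_pos ⟨hb.1, hp⟩, ih hcs, if_pos hrf,
            if_pos ⟨by simp [hb.1], hb.2⟩]
          simp
        · rw [find_namespace_end_loop, if_neg (fun h => hp h.2), if_neg hc,
            ih hcs, if_pos hrf, if_pos ⟨by simp [hb.1], hb.2⟩]
          simp
      · rw [if_pos hrf, if_neg hb]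
        by_cases hq : c = ':' ∧ prev = some ':'
        · rw [find_namespace_end_loop, if_pos hq, ih hcs, if_pos hrf,
            if_neg (fun h => hb ⟨hq.1, by simpa [hq.1] using h.2⟩)]
          simp [hq]
        · rw [find_namespace_end_loop, if_neg hq, if_neg hc, ih hcs, if_pos hrf,
            if_neg (fun h => hb ⟨by injection h.1, by simpa using h.2⟩)]
          simp
          intro h1 h2; exact absurd ⟨h2, h1⟩ hq
    · have hne : 1 + PySem.Chars.rfind cs [':', ':'] ≠ -1 := by
        rw [PySem.Chars.rfind] at hrf ⊢; omega
      rw [if_neg hrf, if_neg hne]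
      by_cases hq : c = ':' ∧ prev = some ':'
      · rw [find_namespace_end_loop, if_pos hq, ih hcs, if_neg hrf]; ring
      · rw [find_namespace_end_loop, if_neg hq, if_neg hc, ih hcs, if_neg hrf]; ring

-- A's loop never looks past the first '<'
theorem pvLoop_region (s : List Char) :
    ∀ (prev : Option Char) (pos last : Int),
    find_namespace_end_loop s last prev pos =
      find_namespace_end_loop (pvRegion s) last prev pos := by
  induction s with
  | nil => intro _ _ _; rfl
  | cons c cs ih =>
    intro prev pos last
    by_cases h : c = '<'
    · subst h
      rw [find_namespace_end_loop]
      have : ¬('<' = ':' ∧ prev = some ':') := by simp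
      rw [if_neg this, if_pos rfl]
      simp [pvRegion, find_namespace_end_loop]
    · simp only [pvRegion, if_neg h]
      rw [find_namespace_end_loop, find_namespace_end_loop]
      split
      · exact ih _ _ _
      · exact ih _ _ _

-- ===== VERDICT (by name: the statement is the Claim_ definition above) =====
theorem find_namespace_end_py_spec : Claim_equal_find_namespace_end_py := by
  intro fqn _
  unfold Spec_find_namespace_end_py find_namespace_end_py find_namespace_end_py_alt
  rw [pvLoop_region, pvLoop_rfind _ (pvRegion_no_lt _)]
  rw [PySem.Str.rfind_eq, pvRegion_eq_B fqn]
  have : ("::" : String).toList = [':', ':'] := by decide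
  rw [this]
  split
  next h => exact h.symm
  next h => ring
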